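-- pv_equiv track=rewrite | github.com/xxxyyy2020/boundary-master | bert_eca/metrics/eca_metrics.py | get_clause_label
-- ===== SOURCE A (Python) =====
-- def get_clause_label(pre_l, tru_l, data_len, exam_label):
--     """
--     对每一个文本获取子句级别的标签
--     """
--     pre = [0] * len(data_len)
--     tru = [0] * len(data_len)
--     predic_clause_len = len(pre_l)
--     tru_clause_len = len(exam_label)
--
--     if tru_clause_len > predic_clause_len:
--         pad_len = tru_clause_len - predic_clause_len
--         for i in range(pad_len):
--             pre_l.append(0)
--         tru_l = exam_label
--
--     tag = 0
--     for i in range(len(data_len)):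
--         prec = pre_l[tag: tag + int(data_len[i])]
--         truc = tru_l[tag: tag + int(data_len[i])]
--         if sum(prec) > 0:
--             pre[i] = 1
--         if sum(truc) > 0:
--             tru[i] = 1
--         tag += int(data_len[i])
--
--     return pre, tru
-- ===== SOURCE B (Python) =====
-- def _prefix(xs):
--     # cumulative sums: out[k] == sum(xs[:k])
--     out = [0]
--     s = 0
--     for x in xs:
--         s += x
--         out.append(s)
--     return out
--
--
-- def get_clause_label(pre_l, tru_l, data_len, exam_label):
--     """Per-clause binary labels: each clause's token span is the slice
--     [tag : tag + len] of the label sequence, and a clause is positive iff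
--     its span sums to a positive value.  Span sums are O(1) range queries
--     on prefix-sum tables; slice.indices() normalizes the span bounds."""
--     if len(exam_label) > len(pre_l):
--         pre_l.extend([0] * (len(exam_label) - len(pre_l)))
--         tru_l = exam_label
--     pp = _prefix(pre_l)
--     tt = _prefix(tru_l)
--     pre, tru, tag = [], [], 0
--     for d in data_len:
--         d = int(d)
--         pa, pb, _ = slice(tag, tag + d).indices(len(pre_l))
--         ta, tb, _ = slice(tag, tag + d).indices(len(tru_l))
--         pre.append(1 if pa < pb and pp[pb] - pp[pa] > 0 else 0)
--         tru.append(1 if ta < tb and tt[tb] - tt[ta] > 0 else 0)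
--         tag += d
--     return pre, tru
-- ===== Notes on version B (the rewrite author's own statement) =====
-- stated objective: alternative
-- what changed: Replaced A's per-clause slice-and-sum scans over the token lists (with writes into preallocated zero lists) by two prefix-sum tables built once, each clause decided by an O(1) range query whose bounds are normalized with slice.indices(), appending results in one pass.
import Mathlib
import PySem

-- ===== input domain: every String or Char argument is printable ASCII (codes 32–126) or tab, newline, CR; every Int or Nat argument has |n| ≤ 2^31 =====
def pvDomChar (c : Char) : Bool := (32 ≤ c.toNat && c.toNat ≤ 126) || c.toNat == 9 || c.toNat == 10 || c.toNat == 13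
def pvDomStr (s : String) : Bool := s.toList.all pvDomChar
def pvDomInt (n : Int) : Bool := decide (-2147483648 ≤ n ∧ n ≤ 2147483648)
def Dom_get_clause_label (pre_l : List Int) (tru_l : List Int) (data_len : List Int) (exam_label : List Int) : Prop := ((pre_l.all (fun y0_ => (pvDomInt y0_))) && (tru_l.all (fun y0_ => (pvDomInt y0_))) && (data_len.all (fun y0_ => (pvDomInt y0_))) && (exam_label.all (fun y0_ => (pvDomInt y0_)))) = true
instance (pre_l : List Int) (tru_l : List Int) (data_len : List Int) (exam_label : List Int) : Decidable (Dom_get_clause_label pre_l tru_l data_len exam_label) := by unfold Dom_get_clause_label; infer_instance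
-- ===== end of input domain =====

-- B replaces A's per-clause slice-and-sum scans by two prefix-sum tables with O(1) range queries per clause.
-- The equivalence proved is about the return value; both A and B extend pre_l in place in the same way.

-- ===== PORT A =====
def get_clause_label (pre_l : List Int) (tru_l : List Int) (data_len : List Int) (exam_label : List Int) : List Int × List Int :=
  let pre := List.replicate data_len.length (0 : Int)
  let tru := List.replicate data_len.length (0 : Int)
  let predic_clause_len := pre_l.length
  let tru_clause_len := exam_label.length
  -- if tru_clause_len > predic_clause_len: for i in range(pad_len): pre_l.append(0);  tru_l = exam_label
  let pre_l2 := if tru_clause_len > predic_clause_len then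
      (List.range (tru_clause_len - predic_clause_len)).foldl (fun acc _ => acc ++ [(0 : Int)]) pre_l
    else pre_l
  let tru_l2 := if tru_clause_len > predic_clause_len then exam_label else tru_l
  let r := (List.range data_len.length).foldl
    (fun (s : List Int × List Int × Int) i =>
      let d := PySem.List.pyGetD data_len (Int.ofNat i) 0
      let prec := PySem.List.slice pre_l2 (some s.2.2) (some (s.2.2 + d))
      let truc := PySem.List.slice tru_l2 (some s.2.2) (some (s.2.2 + d))
      let p := if prec.sum > 0 then s.1.set i 1 else s.1
      let t := if truc.sum > 0 then s.2.1.set i 1 else s.2.1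
      (p, t, s.2.2 + d))
    (pre, tru, (0 : Int))
  (r.1, r.2.1)

-- ===== PORT B =====
-- _prefix: cumulative sums, out[k] == sum(xs[:k])
def pvPrefix (s : Int) : List Int → List Int
  | [] => [s]
  | x :: xs => s :: pvPrefix (s + x) xs

-- Source B's loop; Python's slice(a,b).indices(n) bound normalization is PySem.List.clampIdx n
def pvBLoop (pp tt : List Int) (np nt : Nat) (tag : Int) : List Int → List Int × List Int
  | [] => ([], [])
  | d :: ds =>
    let pa := PySem.List.clampIdx np tag
    let pb := PySem.List.clampIdx np (tag + d)
    let ta := PySem.List.clampIdx nt tag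
    let tb := PySem.List.clampIdx nt (tag + d)
    let p : Int := if pa < pb ∧ pp.getD pb 0 - pp.getD pa 0 > 0 then 1 else 0
    let t : Int := if ta < tb ∧ tt.getD tb 0 - tt.getD ta 0 > 0 then 1 else 0
    let r := pvBLoop pp tt np nt (tag + d) ds
    (p :: r.1, t :: r.2)

def get_clause_label_alt (pre_l : List Int) (tru_l : List Int) (data_len : List Int) (exam_label : List Int) : List Int × List Int :=
  let pre_l2 := if exam_label.length > pre_l.length then
      pre_l ++ List.replicate (exam_label.length - pre_l.length) (0 : Int)
    else pre_l
  let tru_l2 := if exam_label.length > pre_l.length then exam_label else tru_l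
  let pp := pvPrefix 0 pre_l2
  let tt := pvPrefix 0 tru_l2
  pvBLoop pp tt pre_l2.length tru_l2.length 0 data_len

-- ===== PRECONDITION & SPEC =====
def Spec_get_clause_label (pre_l : List Int) (tru_l : List Int) (data_len : List Int) (exam_label : List Int) (out : List Int × List Int) : Prop := out = get_clause_label_alt pre_l tru_l data_len exam_label
instance (pre_l : List Int) (tru_l : List Int) (data_len : List Int) (exam_label : List Int) (out : List Int × List Int) : Decidable (Spec_get_clause_label pre_l tru_l data_len exam_label out) := by unfold Spec_get_clause_label; infer_instance

-- ===== CLAIM (what is proved, stated in full; the proofs are below) =====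
def Claim_equal_get_clause_label : Prop := ∀ (pre_l : List Int) (tru_l : List Int) (data_len : List Int) (exam_label : List Int), Dom_get_clause_label pre_l tru_l data_len exam_label → Spec_get_clause_label pre_l tru_l data_len exam_label (get_clause_label pre_l tru_l data_len exam_label)

-- ===== LEMMAS AND PROOFS =====

-- the prefix table reads back partial sums
theorem pvPrefix_getD (xs : List Int) : ∀ (s : Int) (k : Nat), k ≤ xs.length →
    (pvPrefix s xs).getD k 0 = s + (xs.take k).sum := by
  induction xs with
  | nil =>
    intro s k hk
    have h0 : k = 0 := by simpa using hk
    subst h0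
    simp [pvPrefix]
  | cons x xs ih =>
    intro s k hk
    cases k with
    | zero => simp [pvPrefix]
    | succ k =>
      simp only [pvPrefix, List.getD_cons_succ, List.take_succ_cons, List.sum_cons]
      rw [ih (s + x) k (by simpa using hk)]; ring

-- sum of a Python slice via truncated prefix sums
theorem slice_sum_eq (xs : List Int) (a b : Int)
    (h : PySem.List.clampIdx xs.length a ≤ PySem.List.clampIdx xs.length b) :
    (PySem.List.slice xs (some a) (some b)).sum =
      (xs.take (PySem.List.clampIdx xs.length b)).sum - (xs.take (PySem.List.clampIdx xs.length a)).sum := by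
  unfold PySem.List.slice
  set lo := PySem.List.clampIdx xs.length a
  set hi := PySem.List.clampIdx xs.length b
  have h1 : List.take (hi - lo) (List.drop lo xs) = List.drop lo (List.take hi xs) := (List.drop_take ..).symm
  rw [h1]
  have h2 : (List.take lo (List.take hi xs)).sum + (List.drop lo (List.take hi xs)).sum = (List.take hi xs).sum :=
    List.sum_take_add_sum_drop _ _
  rw [List.take_take, Nat.min_eq_left h] at h2
  omega

-- the per-clause bit A computes equals the prefix-table test B computes
theorem bit_eq (xs : List Int) (tag d : Int) :
    ((PySem.List.slice xs (some tag) (some (tag + d))).sum > 0) ↔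
      (PySem.List.clampIdx xs.length tag < PySem.List.clampIdx xs.length (tag + d) ∧
       (pvPrefix 0 xs).getD (PySem.List.clampIdx xs.length (tag + d)) 0 -
         (pvPrefix 0 xs).getD (PySem.List.clampIdx xs.length tag) 0 > 0) := by
  set n := xs.length with hn
  set lo := PySem.List.clampIdx n tag with hlo
  set hi := PySem.List.clampIdx n (tag + d) with hhi
  have hlon : lo ≤ n := PySem.List.clampIdx_le _ _
  have hhin : hi ≤ n := PySem.List.clampIdx_le _ _
  rw [pvPrefix_getD xs 0 hi hhin, pvPrefix_getD xs 0 lo hlon]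
  by_cases hc : lo < hi
  · rw [slice_sum_eq xs tag (tag + d) (le_of_lt hc), ← hn, ← hhi, ← hlo]
    simp only [hc, true_and, zero_add]
  · have hempty : PySem.List.slice xs (some tag) (some (tag + d)) = [] := by
      unfold PySem.List.slice
      show List.take (PySem.List.clampIdx n (tag + d) - PySem.List.clampIdx n tag) (List.drop (PySem.List.clampIdx n tag) xs) = []
      rw [← hhi, ← hlo]
      have h0 : hi - lo = 0 := by omega
      simp [h0]
    rw [hempty]
    simp only [List.sum_nil, zero_add]
    constructor
    · intro h; exact absurd h (by omega)
    · rintro ⟨h1, h2⟩; exact absurd h1 hc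

-- setting position j (= accumulated length) in "done ++ zeros" is appending one bit
theorem set_bit (L : List Int) (j k : Nat) (hL : L.length = j) (c : Prop) [Decidable c] :
    (if c then (L ++ List.replicate (k+1) (0:Int)).set j 1 else (L ++ List.replicate (k+1) (0:Int)))
      = (L ++ [if c then (1:Int) else 0]) ++ List.replicate k 0 := by
  subst hL
  split_ifs with h
  · rw [List.set_append]; simp [List.replicate_succ]
  · simp [List.replicate_succ]

-- main loop correspondence: A's fold over range' with in-place sets = B's structural recursion
theorem loop_eq (pre_l2 tru_l2 data_len : List Int) : ∀ (k j : Nat) (P T : List Int) (tag : Int),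
    P.length = j → T.length = j → j + k = data_len.length →
    ((List.range' j k).foldl
      (fun (s : List Int × List Int × Int) i =>
        let d := PySem.List.pyGetD data_len (Int.ofNat i) 0
        let prec := PySem.List.slice pre_l2 (some s.2.2) (some (s.2.2 + d))
        let truc := PySem.List.slice tru_l2 (some s.2.2) (some (s.2.2 + d))
        let p := if prec.sum > 0 then s.1.set i 1 else s.1
        let t := if truc.sum > 0 then s.2.1.set i 1 else s.2.1
        (p, t, s.2.2 + d))
      (P ++ List.replicate k 0, T ++ List.replicate k 0, tag)).1
      = P ++ (pvBLoop (pvPrefix 0 pre_l2) (pvPrefix 0 tru_l2) pre_l2.length tru_l2.length tag (data_len.drop j)).1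
    ∧ ((List.range' j k).foldl
      (fun (s : List Int × List Int × Int) i =>
        let d := PySem.List.pyGetD data_len (Int.ofNat i) 0
        let prec := PySem.List.slice pre_l2 (some s.2.2) (some (s.2.2 + d))
        let truc := PySem.List.slice tru_l2 (some s.2.2) (some (s.2.2 + d))
        let p := if prec.sum > 0 then s.1.set i 1 else s.1
        let t := if truc.sum > 0 then s.2.1.set i 1 else s.2.1
        (p, t, s.2.2 + d))
      (P ++ List.replicate k 0, T ++ List.replicate k 0, tag)).2.1
      = T ++ (pvBLoop (pvPrefix 0 pre_l2) (pvPrefix 0 tru_l2) pre_l2.length tru_l2.length tag (data_len.drop j)).2 := by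
  intro k
  induction k with
  | zero =>
    intro j P T tag hP hT hk
    have hdrop : data_len.drop j = [] := List.drop_of_length_le (by omega)
    simp [hdrop, pvBLoop]
  | succ k ih =>
    intro j P T tag hP hT hk
    have hj : j < data_len.length := by omega
    rw [List.range'_succ, List.foldl_cons]
    have hd : PySem.List.pyGetD data_len (Int.ofNat j) 0 = data_len[j] := by
      have := List.getD_eq_getElem data_len 0 hj
      simp only [Int.ofNat_eq_natCast, PySem.List.pyGetD_natCast]
      exact this
    dsimp only
    rw [hd, set_bit P j k hP, set_bit T j k hT]
    rw [List.drop_eq_getElem_cons hj]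
    have hrec := ih (j+1) (P ++ [if (PySem.List.slice pre_l2 (some tag) (some (tag + data_len[j]))).sum > 0 then (1:Int) else 0])
      (T ++ [if (PySem.List.slice tru_l2 (some tag) (some (tag + data_len[j]))).sum > 0 then (1:Int) else 0])
      (tag + data_len[j]) (by simp [hP]) (by simp [hT]) (by omega)
    rw [hrec.1, hrec.2]
    simp only [pvBLoop, bit_eq pre_l2 tag data_len[j], bit_eq tru_l2 tag data_len[j],
      List.append_assoc, List.cons_append, List.nil_append, and_self]

-- ===== VERDICT (by name: the statement is the Claim_ definition above) =====
theorem get_clause_label_spec : Claim_equal_get_clause_label := by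
  unfold Claim_equal_get_clause_label Spec_get_clause_label
  intro pre_l tru_l data_len exam_label _
  unfold get_clause_label get_clause_label_alt
  have hpad : (List.range (exam_label.length - pre_l.length)).foldl (fun acc _ => acc ++ [(0 : Int)]) pre_l
      = pre_l ++ List.replicate (exam_label.length - pre_l.length) 0 := by
    rw [PySem.List.foldl_append_singleton_eq_map (fun _ => (0:Int)) (List.range (exam_label.length - pre_l.length)) pre_l]
    simp [List.map_const']
  dsimp only
  rw [hpad]
  have h := loop_eq
    (if exam_label.length > pre_l.length then pre_l ++ List.replicate (exam_label.length - pre_l.length) 0 else pre_l)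
    (if exam_label.length > pre_l.length then exam_label else tru_l)
    data_len data_len.length 0 [] [] 0 rfl rfl (by omega)
  rw [List.range_eq_range']
  simp only [List.nil_append, List.drop_zero] at h
  exact Prod.ext h.1 h.2
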